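-- pv_equiv track=rewrite | github.com/Stefan13610/TGP | tooling/build_deps_graph.py | coarse_folder_of
-- ===== SOURCE A (Python) =====
-- COARSE_TOP_LEVEL = [
--     "axioms", "core", "core/_meta_latex", "core/formalizm",
--     "partial_proofs", "research", "papers_external", "meta", "tooling",
-- ]
--
-- def coarse_folder_of(fine: str) -> str:
--     """Map a fine folder to one of COARSE_TOP_LEVEL (or '<root>')."""
--     if fine == "<root>":
--         return "<root>"
--     # Check exact matches first (core/_meta_latex, core/formalizm).
--     for top in COARSE_TOP_LEVEL:
--         if fine == top or fine.startswith(top + "/"):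
--             # We want longest-prefix match; COARSE_TOP_LEVEL is ordered
--             # with two-segment entries AFTER 'core', so keep scanning.
--             pass
--     # Longest-prefix match against COARSE_TOP_LEVEL.
--     best = ""
--     for top in COARSE_TOP_LEVEL:
--         if (fine == top or fine.startswith(top + "/")) and len(top) > len(best):
--             best = top
--     if best:
--         return best
--     # First path segment fallback.
--     return fine.split("/", 1)[0]
-- ===== SOURCE B (Python) =====
-- _DEEP = ("core/_meta_latex", "core/formalizm")
--
--
-- def coarse_folder_of(fine: str) -> str:
--     """Map a fine folder to one of COARSE_TOP_LEVEL (or '<root>').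
--
--     Every single-segment coarse folder equals the first path segment of any
--     path it covers, so only the two nested entries need an explicit check;
--     every other path maps to its first segment.
--     """
--     if fine == "<root>":
--         return "<root>"
--     for deep in _DEEP:
--         if fine == deep or fine.startswith(deep + "/"):
--             return deep
--     return fine.split("/", 1)[0]
-- ===== Notes on version B (the rewrite author's own statement) =====
-- stated objective: simpler
-- what changed: B drops the longest-prefix scan over the whole candidate list: since every single-segment coarse folder equals the first path segment it covers, B only checks the two nested entries directly and otherwise returns the first path segment.
import Mathlib
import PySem

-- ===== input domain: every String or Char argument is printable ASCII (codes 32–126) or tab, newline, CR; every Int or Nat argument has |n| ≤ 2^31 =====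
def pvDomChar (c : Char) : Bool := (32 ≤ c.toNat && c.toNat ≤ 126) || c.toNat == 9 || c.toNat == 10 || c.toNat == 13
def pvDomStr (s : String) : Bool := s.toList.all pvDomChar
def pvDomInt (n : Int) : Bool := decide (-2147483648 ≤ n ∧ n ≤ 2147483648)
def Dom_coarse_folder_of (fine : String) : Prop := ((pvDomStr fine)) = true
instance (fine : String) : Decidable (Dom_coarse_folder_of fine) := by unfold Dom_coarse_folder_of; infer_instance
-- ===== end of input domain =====

-- B replaces A's longest-prefix scan over all nine candidates by a direct check of the two
-- nested candidates plus the first-segment fallback (objective: simpler; same return value).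

-- ===== PORT A =====
def COARSE_TOP_LEVEL : List String :=
  ["axioms", "core", "core/_meta_latex", "core/formalizm",
   "partial_proofs", "research", "papers_external", "meta", "tooling"]

def coarse_folder_of (fine : String) : String :=
  if fine == "<root>" then "<root>"
  else
    -- (A's first 'for' loop only executes 'pass': no effect, not ported)
    let best := COARSE_TOP_LEVEL.foldl
      (fun best top =>
        if ((fine == top || PySem.Str.startswith fine (top ++ "/"))
            && decide (PySem.Str.len top > PySem.Str.len best)) then top else best) ""
    if best ≠ "" then best
    -- fine.split("/", 1)[0]: split with a non-empty sep is some nonempty list, so [0] is headD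
    else ((PySem.Str.splitMax? fine "/" 1).getD []).headD ""

-- ===== PORT B =====
def DEEP : List String := ["core/_meta_latex", "core/formalizm"]

def coarse_folder_of_alt (fine : String) : String :=
  if fine == "<root>" then "<root>"
  else
    -- 'for deep in _DEEP: if match: return deep' is List.find?
    match DEEP.find? (fun deep => fine == deep || PySem.Str.startswith fine (deep ++ "/")) with
    | some deep => deep
    | none => ((PySem.Str.splitMax? fine "/" 1).getD []).headD ""

-- ===== PRECONDITION & SPEC =====
def Spec_coarse_folder_of (fine : String) (out : String) : Prop := out = coarse_folder_of_alt fine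
instance (fine : String) (out : String) : Decidable (Spec_coarse_folder_of fine out) := by unfold Spec_coarse_folder_of; infer_instance

-- ===== CLAIM (what is proved, stated in full; the proofs are below) =====
def Claim_equal_coarse_folder_of : Prop := ∀ (fine : String), Dom_coarse_folder_of fine → Spec_coarse_folder_of fine (coarse_folder_of fine)

-- ===== LEMMAS AND PROOFS =====

-- the match test both programs use, as a named predicate for the proofs
def Mb (fine t : String) : Bool := fine == t || PySem.Str.startswith fine (t ++ "/")

lemma match_iff (fine t : String) :
    Mb fine t = true ↔ fine = t ∨ (t.toList ++ ['/']) <+: fine.toList := by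
  simp [Mb, PySem.Str.startswith_eq, String.toList_append, PySem.Chars.startswith_iff,
    Bool.or_eq_true, beq_iff_eq]

lemma match_prefix {fine t : String} (h : Mb fine t = true) :
    (t.toList ++ ['/']) <+: (fine.toList ++ ['/']) := by
  rcases (match_iff fine t).mp h with rfl | hp
  · exact List.prefix_refl _
  · exact List.prefix_append_of_prefix hp

-- two candidates whose '/'-terminated forms are prefix-incomparable cannot both match
lemma not_M {fine t u : String} (ht : Mb fine t = true)
    (h1 : ¬ ((u.toList ++ ['/']) <+: (t.toList ++ ['/'])))
    (h2 : ¬ ((t.toList ++ ['/']) <+: (u.toList ++ ['/']))) : Mb fine u = false := by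
  by_contra hc
  have hu : Mb fine u = true := by revert hc; cases h : Mb fine u <;> simp
  have pt := match_prefix ht
  have pu := match_prefix hu
  rcases le_total (u.toList ++ ['/']).length (t.toList ++ ['/']).length with hle | hle
  · exact h1 (List.prefix_of_prefix_length_le pu pt hle)
  · exact h2 (List.prefix_of_prefix_length_le pt pu hle)

lemma go_zero (f : Nat) (r a : List Char) :
    ∃ rest, PySem.Chars.splitOnMax.go ['/'] f 0 r [] [a] = a :: rest := by
  cases f with
  | zero => exact ⟨[r], by rw [PySem.Chars.splitOnMax.go]; simp⟩
  | succ f =>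
    cases r with
    | nil => exact ⟨[[]], by rw [PySem.Chars.splitOnMax.go]; simp; omega⟩
    | cons c r => exact ⟨[c :: r], by rw [PySem.Chars.splitOnMax.go]; simp⟩

lemma go_head : ∀ (fuel : Nat) (l cur : List Char), l.length < fuel →
    ∃ rest, PySem.Chars.splitOnMax.go ['/'] fuel 1 l cur [] =
      (cur.reverse ++ l.takeWhile (fun c => !(c == '/'))) :: rest := by
  intro fuel
  induction fuel with
  | zero => intro l cur h; omega
  | succ f ih =>
    intro l cur h
    cases l with
    | nil => exact ⟨[], by rw [PySem.Chars.splitOnMax.go]; simp; omega⟩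
    | cons c r =>
      by_cases hc : c = '/'
      · subst hc
        obtain ⟨rest, hrest⟩ := go_zero f r cur.reverse
        refine ⟨rest, ?_⟩
        rw [PySem.Chars.splitOnMax.go]
        simpa [List.isPrefixOf, List.takeWhile] using hrest
      · have hr : r.length < f := by simp at h; omega
        obtain ⟨rest, hrest⟩ := ih r (c :: cur) hr
        refine ⟨rest, ?_⟩
        rw [PySem.Chars.splitOnMax.go]
        simp only [List.isPrefixOf, Bool.and_eq_true, beq_iff_eq, List.takeWhile]
        rw [if_neg (by omega), if_neg (by simp [Ne.symm hc]),
          show (!(c == '/')) = true from by simp [hc]]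
        simpa [List.reverse_cons] using hrest

lemma splitOnMax_head (cs : List Char) :
    ∃ rest, PySem.Chars.splitOnMax cs ['/'] 1 =
      (cs.takeWhile (fun c => !(c == '/'))) :: rest := by
  unfold PySem.Chars.splitOnMax
  simpa using go_head (cs.length + 1) cs [] (by omega)

-- the shared fallback 'fine.split("/", 1)[0]' returns t whenever a '/-free' t matches
lemma fallback_eq {fine t : String} (hno : '/' ∉ t.toList) (h : Mb fine t = true) :
    ((PySem.Str.splitMax? fine "/" 1).getD []).headD "" = t := by
  obtain ⟨rest, hr⟩ := splitOnMax_head fine.toList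
  have htw : fine.toList.takeWhile (fun c => !(c == '/')) = t.toList := by
    rcases (match_iff fine t).mp h with rfl | hp
    · exact List.takeWhile_eq_self_iff.mpr
        (fun x hx => by simp; exact fun e => hno (e ▸ hx))
    · obtain ⟨r, hr2⟩ := hp
      rw [← hr2, List.append_assoc, List.takeWhile_append_of_pos
        (fun x hx => by simp; exact fun e => hno (e ▸ hx))]
      simp
  simp [PySem.Str.splitMax?, PySem.Chars.splitMax?, hr, htw]

lemma match_iff' (fine t : String) :
    Mb fine t = true ↔ (t.toList ++ ['/']) <+: (fine.toList ++ ['/']) := by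
  constructor
  · exact match_prefix
  · intro h
    rcases Nat.lt_or_ge fine.toList.length (t.toList ++ ['/']).length with hlt | hle
    · have hlen : (t.toList ++ ['/']).length = (fine.toList ++ ['/']).length := by
        have := h.length_le; simp at *; omega
      have heq := List.append_cancel_right (List.IsPrefix.eq_of_length h hlen)
      exact (match_iff fine t).mpr (Or.inl (String.toList_inj.mp heq).symm)
    · have hp : (t.toList ++ ['/']) <+: fine.toList := by
        have h2 := List.prefix_iff_eq_take.mp h
        rw [List.take_append_of_le_length hle] at h2
        exact h2 ▸ List.take_prefix _ _
      exact (match_iff fine t).mpr (Or.inr hp)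

-- ===== VERDICT (by name: the statement is the Claim_ definition above) =====
theorem coarse_folder_of_spec : Claim_equal_coarse_folder_of := by
  intro fine _
  unfold Spec_coarse_folder_of coarse_folder_of coarse_folder_of_alt
  by_cases hroot : (fine == "<root>") = true
  · simp [hroot]
  · by_cases h1 : Mb fine "core/_meta_latex" = true
    · have hcore : Mb fine "core" = true :=
        (match_iff' fine "core").mpr (List.IsPrefix.trans (by decide) (match_prefix h1))
      have hax : Mb fine "axioms" = false := not_M h1 (by decide) (by decide)
      have hd2 : Mb fine "core/formalizm" = false := not_M h1 (by decide) (by decide)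
      have hpp : Mb fine "partial_proofs" = false := not_M h1 (by decide) (by decide)
      have hres : Mb fine "research" = false := not_M h1 (by decide) (by decide)
      have hpe : Mb fine "papers_external" = false := not_M h1 (by decide) (by decide)
      have hmeta : Mb fine "meta" = false := not_M h1 (by decide) (by decide)
      have htool : Mb fine "tooling" = false := not_M h1 (by decide) (by decide)
      have hb1 := h1
      have hb2 := hd2
      simp only [Mb, PySem.Str.startswith_eq, String.toList_append, String.reduceToList, List.cons_append, List.nil_append] at hb1 hb2
      simp [Mb] at h1 hcore hax hd2 hpp hres hpe hmeta htool
      simp [COARSE_TOP_LEVEL, DEEP, List.find?, hroot, hb1, hb2, h1, hcore, hax, hd2, hpp, hres,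
        hpe, hmeta, htool, show String.length "axioms" = 6 from rfl, show String.length "core" = 4 from rfl, show String.length "core/_meta_latex" = 16 from rfl, show String.length "core/formalizm" = 14 from rfl, show String.length "partial_proofs" = 14 from rfl, show String.length "research" = 8 from rfl, show String.length "papers_external" = 15 from rfl, show String.length "meta" = 4 from rfl, show String.length "tooling" = 7 from rfl, show String.length "" = 0 from rfl]
    · by_cases h2 : Mb fine "core/formalizm" = true
      · have hcore : Mb fine "core" = true :=
          (match_iff' fine "core").mpr (List.IsPrefix.trans (by decide) (match_prefix h2))
        have hax : Mb fine "axioms" = false := not_M h2 (by decide) (by decide)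
        have hpp : Mb fine "partial_proofs" = false := not_M h2 (by decide) (by decide)
        have hres : Mb fine "research" = false := not_M h2 (by decide) (by decide)
        have hpe : Mb fine "papers_external" = false := not_M h2 (by decide) (by decide)
        have hmeta : Mb fine "meta" = false := not_M h2 (by decide) (by decide)
        have htool : Mb fine "tooling" = false := not_M h2 (by decide) (by decide)
        have h1' : Mb fine "core/_meta_latex" = false := by
          revert h1; cases Mb fine "core/_meta_latex" <;> simp
        have hb1 := h1'
        have hb2 := h2
        simp only [Mb, PySem.Str.startswith_eq, String.toList_append, String.reduceToList, List.cons_append, List.nil_append] at hb1 hb2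
        simp [Mb] at h2 hcore hax hpp hres hpe hmeta htool h1'
        simp [COARSE_TOP_LEVEL, DEEP, List.find?, hroot, hb1, hb2, h2, hcore, hax, hpp, hres,
          hpe, hmeta, htool, h1', show String.length "axioms" = 6 from rfl, show String.length "core" = 4 from rfl, show String.length "core/_meta_latex" = 16 from rfl, show String.length "core/formalizm" = 14 from rfl, show String.length "partial_proofs" = 14 from rfl, show String.length "research" = 8 from rfl, show String.length "papers_external" = 15 from rfl, show String.length "meta" = 4 from rfl, show String.length "tooling" = 7 from rfl, show String.length "" = 0 from rfl]
      · have h1' : Mb fine "core/_meta_latex" = false := by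
          revert h1; cases Mb fine "core/_meta_latex" <;> simp
        have h2' : Mb fine "core/formalizm" = false := by
          revert h2; cases Mb fine "core/formalizm" <;> simp
        have hb1 := h1'
        have hb2 := h2'
        simp only [Mb, PySem.Str.startswith_eq, String.toList_append, String.reduceToList, List.cons_append, List.nil_append] at hb1 hb2
        have hq1 : (fine == "core/_meta_latex") = false :=
          beq_eq_false_iff_ne.mpr (by intro h; subst h; simp [Mb] at h1')
        have hq2 : (fine == "core/formalizm") = false :=
          beq_eq_false_iff_ne.mpr (by intro h; subst h; simp [Mb] at h2')
        have single : ∀ t : String, '/' ∉ t.toList → Mb fine t = true →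
            ((PySem.Str.splitMax? fine "/" 1).getD []).headD "" = t :=
          fun t hno ht => fallback_eq hno ht
        by_cases hax : Mb fine "axioms" = true
        · have hcore : Mb fine "core" = false := not_M hax (by decide) (by decide)
          have hpp : Mb fine "partial_proofs" = false := not_M hax (by decide) (by decide)
          have hres : Mb fine "research" = false := not_M hax (by decide) (by decide)
          have hpe : Mb fine "papers_external" = false := not_M hax (by decide) (by decide)
          have hmeta : Mb fine "meta" = false := not_M hax (by decide) (by decide)
          have htool : Mb fine "tooling" = false := not_M hax (by decide) (by decide)
          have hfb := single "axioms" (by decide) hax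
          rw [List.headD_eq_head?_getD] at hfb
          simp [Mb] at hax hcore hpp hres hpe hmeta htool h1' h2'
          simp [COARSE_TOP_LEVEL, DEEP, List.find?, hroot, hb1, hb2, hq1, hq2, hax, hcore, hpp, hres,
            hpe, hmeta, htool, h1', h2', show String.length "axioms" = 6 from rfl, show String.length "core" = 4 from rfl, show String.length "core/_meta_latex" = 16 from rfl, show String.length "core/formalizm" = 14 from rfl, show String.length "partial_proofs" = 14 from rfl, show String.length "research" = 8 from rfl, show String.length "papers_external" = 15 from rfl, show String.length "meta" = 4 from rfl, show String.length "tooling" = 7 from rfl, show String.length "" = 0 from rfl, hfb]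
        · have hax' : Mb fine "axioms" = false := by
            revert hax; cases Mb fine "axioms" <;> simp
          by_cases hcore : Mb fine "core" = true
          · have hpp : Mb fine "partial_proofs" = false := not_M hcore (by decide) (by decide)
            have hres : Mb fine "research" = false := not_M hcore (by decide) (by decide)
            have hpe : Mb fine "papers_external" = false := not_M hcore (by decide) (by decide)
            have hmeta : Mb fine "meta" = false := not_M hcore (by decide) (by decide)
            have htool : Mb fine "tooling" = false := not_M hcore (by decide) (by decide)
            have hfb := single "core" (by decide) hcore
            rw [List.headD_eq_head?_getD] at hfb
            simp [Mb] at hcore hpp hres hpe hmeta htool h1' h2' hax'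
            simp [COARSE_TOP_LEVEL, DEEP, List.find?, hroot, hb1, hb2, hq1, hq2, hcore, hpp, hres,
              hpe, hmeta, htool, h1', h2', hax', show String.length "axioms" = 6 from rfl, show String.length "core" = 4 from rfl, show String.length "core/_meta_latex" = 16 from rfl, show String.length "core/formalizm" = 14 from rfl, show String.length "partial_proofs" = 14 from rfl, show String.length "research" = 8 from rfl, show String.length "papers_external" = 15 from rfl, show String.length "meta" = 4 from rfl, show String.length "tooling" = 7 from rfl, show String.length "" = 0 from rfl, hfb]
          · have hcore' : Mb fine "core" = false := by
              revert hcore; cases Mb fine "core" <;> simp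
            by_cases hpp : Mb fine "partial_proofs" = true
            · have hres : Mb fine "research" = false := not_M hpp (by decide) (by decide)
              have hpe : Mb fine "papers_external" = false := not_M hpp (by decide) (by decide)
              have hmeta : Mb fine "meta" = false := not_M hpp (by decide) (by decide)
              have htool : Mb fine "tooling" = false := not_M hpp (by decide) (by decide)
              have hfb := single "partial_proofs" (by decide) hpp
              rw [List.headD_eq_head?_getD] at hfb
              simp [Mb] at hpp hres hpe hmeta htool h1' h2' hax' hcore'
              simp [COARSE_TOP_LEVEL, DEEP, List.find?, hroot, hb1, hb2, hq1, hq2, hpp, hres,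
                hpe, hmeta, htool, h1', h2', hax', hcore', show String.length "axioms" = 6 from rfl, show String.length "core" = 4 from rfl, show String.length "core/_meta_latex" = 16 from rfl, show String.length "core/formalizm" = 14 from rfl, show String.length "partial_proofs" = 14 from rfl, show String.length "research" = 8 from rfl, show String.length "papers_external" = 15 from rfl, show String.length "meta" = 4 from rfl, show String.length "tooling" = 7 from rfl, show String.length "" = 0 from rfl, hfb]
            · have hpp' : Mb fine "partial_proofs" = false := by
                revert hpp; cases Mb fine "partial_proofs" <;> simp
              by_cases hres : Mb fine "research" = true
              · have hpe : Mb fine "papers_external" = false := not_M hres (by decide) (by decide)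
                have hmeta : Mb fine "meta" = false := not_M hres (by decide) (by decide)
                have htool : Mb fine "tooling" = false := not_M hres (by decide) (by decide)
                have hfb := single "research" (by decide) hres
                rw [List.headD_eq_head?_getD] at hfb
                simp [Mb] at hres hpe hmeta htool h1' h2' hax' hcore' hpp'
                simp [COARSE_TOP_LEVEL, DEEP, List.find?, hroot, hb1, hb2, hq1, hq2, hres,
                  hpe, hmeta, htool, h1', h2', hax', hcore', hpp', show String.length "axioms" = 6 from rfl, show String.length "core" = 4 from rfl, show String.length "core/_meta_latex" = 16 from rfl, show String.length "core/formalizm" = 14 from rfl, show String.length "partial_proofs" = 14 from rfl, show String.length "research" = 8 from rfl, show String.length "papers_external" = 15 from rfl, show String.length "meta" = 4 from rfl, show String.length "tooling" = 7 from rfl, show String.length "" = 0 from rfl, hfb]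
              · have hres' : Mb fine "research" = false := by
                  revert hres; cases Mb fine "research" <;> simp
                by_cases hpe : Mb fine "papers_external" = true
                · have hmeta : Mb fine "meta" = false := not_M hpe (by decide) (by decide)
                  have htool : Mb fine "tooling" = false := not_M hpe (by decide) (by decide)
                  have hfb := single "papers_external" (by decide) hpe
                  rw [List.headD_eq_head?_getD] at hfb
                  simp [Mb] at hpe hmeta htool h1' h2' hax' hcore' hpp' hres'
                  simp [COARSE_TOP_LEVEL, DEEP, List.find?, hroot, hb1, hb2, hq1, hq2, hpe,
                    hmeta, htool, h1', h2', hax', hcore', hpp', hres', show String.length "axioms" = 6 from rfl, show String.length "core" = 4 from rfl, show String.length "core/_meta_latex" = 16 from rfl, show String.length "core/formalizm" = 14 from rfl, show String.length "partial_proofs" = 14 from rfl, show String.length "research" = 8 from rfl, show String.length "papers_external" = 15 from rfl, show String.length "meta" = 4 from rfl, show String.length "tooling" = 7 from rfl, show String.length "" = 0 from rfl, hfb]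
                · have hpe' : Mb fine "papers_external" = false := by
                    revert hpe; cases Mb fine "papers_external" <;> simp
                  by_cases hmeta : Mb fine "meta" = true
                  · have htool : Mb fine "tooling" = false := not_M hmeta (by decide) (by decide)
                    have hfb := single "meta" (by decide) hmeta
                    rw [List.headD_eq_head?_getD] at hfb
                    simp [Mb] at hmeta htool h1' h2' hax' hcore' hpp' hres' hpe'
                    simp [COARSE_TOP_LEVEL, DEEP, List.find?, hroot, hb1, hb2, hq1, hq2, hmeta,
                      htool, h1', h2', hax', hcore', hpp', hres', hpe', show String.length "axioms" = 6 from rfl, show String.length "core" = 4 from rfl, show String.length "core/_meta_latex" = 16 from rfl, show String.length "core/formalizm" = 14 from rfl, show String.length "partial_proofs" = 14 from rfl, show String.length "research" = 8 from rfl, show String.length "papers_external" = 15 from rfl, show String.length "meta" = 4 from rfl, show String.length "tooling" = 7 from rfl, show String.length "" = 0 from rfl, hfb]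
                  · have hmeta' : Mb fine "meta" = false := by
                      revert hmeta; cases Mb fine "meta" <;> simp
                    by_cases htool : Mb fine "tooling" = true
                    · have hfb := single "tooling" (by decide) htool
                      rw [List.headD_eq_head?_getD] at hfb
                      simp [Mb] at htool h1' h2' hax' hcore' hpp' hres' hpe' hmeta'
                      simp [COARSE_TOP_LEVEL, DEEP, List.find?, hroot, hb1, hb2, hq1, hq2, htool,
                        h1', h2', hax', hcore', hpp', hres', hpe', hmeta', show String.length "axioms" = 6 from rfl, show String.length "core" = 4 from rfl, show String.length "core/_meta_latex" = 16 from rfl, show String.length "core/formalizm" = 14 from rfl, show String.length "partial_proofs" = 14 from rfl, show String.length "research" = 8 from rfl, show String.length "papers_external" = 15 from rfl, show String.length "meta" = 4 from rfl, show String.length "tooling" = 7 from rfl, show String.length "" = 0 from rfl, hfb]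
                    · have htool' : Mb fine "tooling" = false := by
                        revert htool; cases Mb fine "tooling" <;> simp
                      simp [Mb] at h1' h2' hax' hcore' hpp' hres' hpe' hmeta' htool'
                      simp [COARSE_TOP_LEVEL, DEEP, List.find?, hroot, hb1, hb2, hq1, hq2,
                        h1', h2', hax', hcore', hpp', hres', hpe', hmeta', htool', show String.length "axioms" = 6 from rfl, show String.length "core" = 4 from rfl, show String.length "core/_meta_latex" = 16 from rfl, show String.length "core/formalizm" = 14 from rfl, show String.length "partial_proofs" = 14 from rfl, show String.length "research" = 8 from rfl, show String.length "papers_external" = 15 from rfl, show String.length "meta" = 4 from rfl, show String.length "tooling" = 7 from rfl, show String.length "" = 0 from rfl]
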